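-- pv_equiv track=rewrite | github.com/cmdimkpa/cmdimkpa.github.io | base.py | get_page_chunks
-- ===== SOURCE A (Python) =====
-- from typing import List, Any, Tuple, Union, Callable
--
-- def get_page_chunks(
--     items: List[Any],
--     page_size: int,
-- ) -> List[List[Any]]:
--     """partition a block of items into chunks of pages"""
--     items = ensure_list(items)
--     block_length = len(items)
--     whole_chunks = block_length // page_size
--     chunks = []
--     for i in range(whole_chunks):
--         start = i * page_size
--         stop = (i + 1) * page_size
--         chunk = items[start:stop]
--         chunks.append(chunk)
--     rem = block_length % page_size
--     if rem:
--         partial_chunk = items[-rem:]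
--         chunks.append(partial_chunk)
--     return chunks
--
-- def ensure_list(item: Any) -> list:
--     return item if isinstance(item, list) else [item]
-- ===== SOURCE B (Python) =====
-- from typing import List, Any
--
-- def ensure_list(item: Any) -> list:
--     return item if isinstance(item, list) else [item]
--
-- def get_page_chunks(
--     items: List[Any],
--     page_size: int,
-- ) -> List[List[Any]]:
--     """partition a block of items into chunks of pages"""
--     items = ensure_list(items)
--     if page_size <= 0:
--         return []
--     chunks = []
--     page = []
--     for x in items:
--         page.append(x)
--         if len(page) == page_size:
--             chunks.append(page)
--             page = []
--     if page:
--         chunks.append(page)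
--     return chunks
-- ===== Notes on version B (the rewrite author's own statement) =====
-- stated objective: alternative
-- what changed: A computes chunk boundaries arithmetically (floordiv-counted loop of index slices plus a modulo/negative-slice remainder branch); B never slices or indexes at all: it makes one element-wise pass, appending each element to a current page and emitting the page whenever it reaches page_size, flushing the partial page at the end.
-- intended difference: For negative page_size that does not divide len(items), A returns a single accidental tail chunk (e.g. [[]] for the witness ([1], -2)) produced by floor-division/modulo sign artefacts, while B returns [] (no pages of negative size exist), the intended value for this unspecified corner. — e.g. on get_page_chunks([1], -2): A returns [[]], B returns []
import Mathlib
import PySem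

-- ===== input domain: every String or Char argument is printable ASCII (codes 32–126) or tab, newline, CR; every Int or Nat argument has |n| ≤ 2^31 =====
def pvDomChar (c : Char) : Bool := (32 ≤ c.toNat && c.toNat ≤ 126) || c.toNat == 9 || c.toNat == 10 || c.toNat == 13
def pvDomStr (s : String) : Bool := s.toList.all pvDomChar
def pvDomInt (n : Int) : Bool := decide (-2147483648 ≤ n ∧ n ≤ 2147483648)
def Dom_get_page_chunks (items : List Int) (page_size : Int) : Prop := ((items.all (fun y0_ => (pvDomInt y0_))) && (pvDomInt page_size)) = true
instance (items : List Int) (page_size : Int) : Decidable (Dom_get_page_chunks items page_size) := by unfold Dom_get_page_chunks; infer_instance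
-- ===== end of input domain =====

-- B drops A's slice/floordiv/modulo arithmetic entirely: one element-wise pass accumulating a
-- current page and emitting it when it reaches page_size; objective: alternative decomposition.

-- ===== PORT A =====
-- ensure_list(items): items is already a list under the typed domain, so it is the identity.
def get_page_chunks (items : List Int) (page_size : Int) : List (List Int) :=
  let block_length : Int := (items.length : Int)
  let whole_chunks : Int := PySem.Int.floordiv block_length page_size
  let chunks : List (List Int) :=
    (PySem.List.pyRange 0 whole_chunks 1).foldl
      (fun chunks i =>
        let start := i * page_size
        let stop := (i + 1) * page_size
        let chunk := PySem.List.slice items (some start) (some stop)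
        chunks ++ [chunk]) []
  let rem : Int := PySem.Int.mod block_length page_size
  if rem ≠ 0 then chunks ++ [PySem.List.slice items (some (-rem)) none] else chunks

-- ===== PORT B =====
def get_page_chunks_alt (items : List Int) (page_size : Int) : List (List Int) :=
  if page_size ≤ 0 then []
  else
    let st : List (List Int) × List Int :=
      items.foldl
        (fun (s : List (List Int) × List Int) x =>
          let page := s.2 ++ [x]
          if (page.length : Int) = page_size then (s.1 ++ [page], [])
          else (s.1, page))
        ([], [])
    if st.2 ≠ [] then st.1 ++ [st.2] else st.1

-- ===== PRECONDITION & SPEC =====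
-- Pre_ excludes page_size = 0, on which A raises ZeroDivisionError.
def Pre_get_page_chunks (items : List Int) (page_size : Int) : Prop := page_size ≠ 0
instance (items : List Int) (page_size : Int) : Decidable (Pre_get_page_chunks items page_size) := by unfold Pre_get_page_chunks; infer_instance

def pvWitness_get_page_chunks : List Int × Int := ([1, 2, 3, 4, 5], 2)

-- For negative page_size not dividing len(items), A returns one accidental tail chunk (a
-- floor-division/modulo sign artefact), while B returns [] — the intended value: no pages of
-- negative size exist.
def D_get_page_chunks (items : List Int) (page_size : Int) : Prop :=
  page_size < 0 ∧ ¬ (page_size ∣ (items.length : Int))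
instance (items : List Int) (page_size : Int) : Decidable (D_get_page_chunks items page_size) := by unfold D_get_page_chunks; infer_instance

def Spec_get_page_chunks (items : List Int) (page_size : Int) (out : List (List Int)) : Prop :=
  ¬ D_get_page_chunks items page_size → out = get_page_chunks_alt items page_size
instance (items : List Int) (page_size : Int) (out : List (List Int)) : Decidable (Spec_get_page_chunks items page_size out) := by unfold Spec_get_page_chunks; infer_instance

def pvDiffWitness_get_page_chunks : List Int × Int := ([1], -2)
def pvDiffWitnessOut_get_page_chunks : (List (List Int)) × (List (List Int)) := ([[]], [])

-- ===== CLAIM (what is proved, stated in full; the proofs are below) =====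
def Claim_unchanged_get_page_chunks : Prop := ∀ (items : List Int) (page_size : Int), Dom_get_page_chunks items page_size → Pre_get_page_chunks items page_size → Spec_get_page_chunks items page_size (get_page_chunks items page_size)
def Claim_changed_get_page_chunks : Prop := Dom_get_page_chunks (pvDiffWitness_get_page_chunks.1) (pvDiffWitness_get_page_chunks.2) ∧ Pre_get_page_chunks (pvDiffWitness_get_page_chunks.1) (pvDiffWitness_get_page_chunks.2) ∧ D_get_page_chunks (pvDiffWitness_get_page_chunks.1) (pvDiffWitness_get_page_chunks.2) ∧ get_page_chunks (pvDiffWitness_get_page_chunks.1) (pvDiffWitness_get_page_chunks.2) = pvDiffWitnessOut_get_page_chunks.1 ∧ get_page_chunks_alt (pvDiffWitness_get_page_chunks.1) (pvDiffWitness_get_page_chunks.2) = pvDiffWitnessOut_get_page_chunks.2 ∧ pvDiffWitnessOut_get_page_chunks.1 ≠ pvDiffWitnessOut_get_page_chunks.2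
def Claim_exact_get_page_chunks : Prop := ∀ (items : List Int) (page_size : Int), Dom_get_page_chunks items page_size → Pre_get_page_chunks items page_size → D_get_page_chunks items page_size → get_page_chunks items page_size ≠ get_page_chunks_alt items page_size

-- ===== LEMMAS AND PROOFS =====

def pvChunks (p : Nat) (xs : List Int) : List (List Int) :=
  if _h : xs = [] ∨ p = 0 then []
  else xs.take p :: pvChunks p (xs.drop p)
termination_by xs.length
decreasing_by
  rcases xs with _ | ⟨y, ys⟩
  · simp_all
  · simp only [List.length_drop, List.length_cons]; omega

lemma pvChunks_nil (p : Nat) : pvChunks p [] = [] := by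
  rw [pvChunks]; simp

lemma pvChunks_cons (p : Nat) (hp : 0 < p) (xs : List Int) (hx : xs ≠ []) :
    pvChunks p xs = xs.take p :: pvChunks p (xs.drop p) := by
  rw [pvChunks, dif_neg (by simp [hx]; omega)]

lemma pvChunks_eq_map (p : Nat) (hp : 0 < p) (xs : List Int) :
    pvChunks p xs = (List.range ((xs.length + p - 1) / p)).map
      (fun k => (xs.drop (k * p)).take p) := by
  by_cases hx : xs = []
  · subst hx
    rw [pvChunks_nil]
    simp only [List.length_nil]
    rw [Nat.div_eq_of_lt (by omega : 0 + p - 1 < p)]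
    simp
  · rw [pvChunks_cons p hp xs hx]
    rw [pvChunks_eq_map p hp (xs.drop p)]
    have hlen : 0 < xs.length := List.length_pos_iff.mpr hx
    by_cases hle : xs.length ≤ p
    · have hdrop : xs.drop p = [] := by
        apply List.drop_eq_nil_of_le; omega
      have h1 : (xs.length + p - 1) / p = 1 := by
        have h2 : 1 ≤ (xs.length + p - 1) / p := (Nat.le_div_iff_mul_le hp).mpr (by omega)
        have h3 : (xs.length + p - 1) / p < 2 := (Nat.div_lt_iff_lt_mul hp).mpr (by omega)
        omega
      rw [hdrop, h1]
      simp
      omega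
    · have hsplit : xs.length + p - 1 = (xs.length - p + p - 1) + p := by omega
      have hcount : (xs.length + p - 1) / p = (xs.length - p + p - 1) / p + 1 := by
        rw [hsplit, Nat.add_div_right _ hp]
      rw [hcount, List.range_succ_eq_map, List.map_cons, List.map_map]
      simp only [List.length_drop]
      congr 1
      · simp
      · apply List.map_congr_left
        intro k _
        simp only [Function.comp, List.drop_drop]
        congr 2
        simp only [Nat.succ_eq_add_one]
        ring
termination_by xs.length
decreasing_by
  simp only [List.length_drop]
  have := List.length_pos_iff.mpr hx
  omega

def pvStep (p : Int) (s : List (List Int) × List Int) (x : Int) : List (List Int) × List Int :=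
  let page := s.2 ++ [x]
  if (page.length : Int) = p then (s.1 ++ [page], []) else (s.1, page)

lemma pvFill (p : Int) (ys cur : List Int) (acc : List (List Int))
    (h : (cur.length : Int) + ys.length = p) (hys : ys ≠ []) :
    ys.foldl (pvStep p) (acc, cur) = (acc ++ [cur ++ ys], []) := by
  induction ys generalizing cur acc with
  | nil => exact absurd rfl hys
  | cons y ys ih =>
    simp only [List.foldl_cons, pvStep]
    rcases ys with _ | ⟨z, zs⟩
    · rw [if_pos (by simp at h ⊢; omega)]
      simp
    · rw [if_neg (by simp at h ⊢; omega)]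
      rw [ih (cur ++ [y]) acc (by simp at h ⊢; omega) (by simp)]
      simp

lemma pvPartial (p : Int) (ys cur : List Int) (acc : List (List Int))
    (h : (cur.length : Int) + ys.length < p) :
    ys.foldl (pvStep p) (acc, cur) = (acc, cur ++ ys) := by
  induction ys generalizing cur acc with
  | nil => simp
  | cons y ys ih =>
    simp only [List.foldl_cons, pvStep]
    rw [if_neg (by simp at h ⊢; omega)]
    rw [ih (cur ++ [y]) acc (by simp at h ⊢; omega)]
    simp

lemma pvMain (p : Int) (hp : 0 < p) (xs : List Int) (acc : List (List Int)) :
    (let st := xs.foldl (pvStep p) (acc, []);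
     if st.2 ≠ [] then st.1 ++ [st.2] else st.1) = acc ++ pvChunks p.toNat xs := by
  have hpn : 0 < p.toNat := by omega
  by_cases hx : xs = []
  · subst hx; simp [pvChunks_nil]
  · have hlen : 0 < xs.length := List.length_pos_iff.mpr hx
    by_cases hle : (xs.length : Int) < p
    · rw [pvPartial p xs [] acc (by simpa)]
      simp only [List.nil_append]
      rw [if_pos hx]
      rw [pvChunks_cons _ hpn _ hx]
      rw [List.take_of_length_le (by omega), List.drop_eq_nil_of_le (by omega), pvChunks_nil]
    · have htake : xs.take p.toNat ≠ [] := by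
        simp [List.take_eq_nil_iff, hx]; omega
      have hsplit : xs = xs.take p.toNat ++ xs.drop p.toNat := (List.take_append_drop _ _).symm
      conv_lhs => rw [hsplit]
      rw [List.foldl_append]
      rw [pvFill p (xs.take p.toNat) [] acc (by simp; omega) htake]
      simp only [List.nil_append]
      rw [pvMain p hp (xs.drop p.toNat) (acc ++ [xs.take p.toNat])]
      rw [pvChunks_cons _ hpn _ hx]
      simp
termination_by xs.length
decreasing_by
  simp only [List.length_drop]
  omega

def pvStride (items : List Int) (page_size : Int) : List (List Int) :=
  (PySem.List.pyRange 0 (items.length : Int) page_size).map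
    (fun i => PySem.List.slice items (some i) (some (i + page_size)))

lemma A_eq_stride (items : List Int) (p : Int) (hp : 0 < p) :
    get_page_chunks items p = pvStride items p := by
  unfold get_page_chunks pvStride
  dsimp only
  set n : Int := (items.length : Int) with hn
  have hn0 : 0 ≤ n := by positivity
  have hdm := PySem.Int.floordiv_mul_add_mod n p
  have hr0 : 0 ≤ PySem.Int.mod n p := PySem.Int.mod_nonneg n hp
  have hrp : PySem.Int.mod n p < p := PySem.Int.mod_lt n hp
  set w := PySem.Int.floordiv n p with hwdef
  set r := PySem.Int.mod n p with hrdef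
  have hw0 : 0 ≤ w := by nlinarith
  rw [PySem.List.foldl_append_singleton_eq_map, List.nil_append]
  rw [PySem.List.pyRange_one, PySem.List.pyRange_of_pos 0 n hp, List.map_map, List.map_map]
  simp only [Int.sub_zero]
  have hwpnn : (0:Int) ≤ w * p := mul_nonneg hw0 hp.le
  by_cases hr : r = 0
  · rw [if_neg (by simp [hr])]
    have hcount : (if (0:Int) < n then ((n + p - 1) / p).toNat else 0) = w.toNat := by
      by_cases hnpos : (0:Int) < n
      · rw [if_pos hnpos]
        congr 1
        have hn' : n = w * p := by omega
        have : n + p - 1 = (p - 1) + w * p := by omega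
        rw [this, Int.add_mul_ediv_right _ _ (by omega), Int.ediv_eq_zero_of_lt (by omega) (by omega)]
        omega
      · have hn0' : n = 0 := by omega
        have hw' : w = 0 := by nlinarith
        simp [hnpos, hw']
    rw [hcount]
    apply List.map_congr_left
    intro k _
    simp only [Function.comp]
    congr 2 <;> ring
  · rw [if_pos (by simp [hr])]
    have hnpos : (0:Int) < n := by omega
    have hcount : (if (0:Int) < n then ((n + p - 1) / p).toNat else 0) = w.toNat + 1 := by
      rw [if_pos hnpos]
      have : n + p - 1 = (r - 1) + (w + 1) * p := by rw [add_mul, one_mul]; omega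
      rw [this, Int.add_mul_ediv_right _ _ (by omega), Int.ediv_eq_zero_of_lt (by omega) (by omega)]
      omega
    rw [hcount, List.range_succ, List.map_append]
    congr 1
    · apply List.map_congr_left
      intro k _
      simp only [Function.comp]
      congr 2 <;> ring
    · simp only [Function.comp, List.map_cons, List.map_nil]
      congr 1
      have hrk : r = ((r.toNat : Int)) := by omega
      rw [hrk, PySem.List.slice_from_neg_natCast items r.toNat (by omega)]
      have hwp : (0:Int) + p * (w.toNat : Int) = n - r := by
        rw [Int.toNat_of_nonneg hw0, mul_comm]; omega
      rw [PySem.List.slice_toNat items (by rw [hwp]; omega) (by rw [hwp]; omega)]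
      rw [hwp]
      have h1 : (n - r).toNat = items.length - r.toNat := by omega
      have h2 : (n - r + p).toNat - (n - r).toNat = p.toNat := by omega
      rw [h2, h1]
      exact (List.take_of_length_le (by simp; omega)).symm

lemma stride_eq_pvChunks (items : List Int) (p : Int) (hp : 0 < p) :
    pvStride items p = pvChunks p.toNat items := by
  unfold pvStride
  rw [pvChunks_eq_map p.toNat (by omega) items]
  rw [PySem.List.pyRange_of_pos 0 (items.length : Int) hp]
  simp only [Int.sub_zero, List.map_map]
  have hcount : (if (0:Int) < (items.length : Int) then (((items.length : Int) + p - 1) / p).toNat else 0)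
      = (items.length + p.toNat - 1) / p.toNat := by
    by_cases hn : (0:Int) < (items.length : Int)
    · rw [if_pos hn]
      have hcast : (items.length : Int) + p - 1 = ((items.length + p.toNat - 1 : Nat) : Int) := by
        omega
      rw [hcast]
      have hdiv : ((items.length + p.toNat - 1 : Nat) : Int) / p
          = (((items.length + p.toNat - 1) / p.toNat : Nat) : Int) := by
        rw [Int.natCast_div]
        congr 1
        omega
      rw [hdiv, Int.toNat_natCast]
    · rw [if_neg hn]
      have : items.length = 0 := by omega
      rw [this]
      rw [Nat.div_eq_of_lt (by omega)]
  rw [hcount]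
  apply List.map_congr_left
  intro k _
  simp only [Function.comp]
  have e1 : (0:Int) + p * (k : Int) = ((p.toNat * k : Nat) : Int) := by
    rw [Nat.cast_mul, Int.toNat_of_nonneg hp.le]; ring
  rw [e1]
  have e2 : ((p.toNat * k : Nat) : Int) + p = ((p.toNat * k : Nat) : Int) + ((p.toNat : Nat) : Int) := by
    rw [Int.toNat_of_nonneg hp.le]
  rw [e2, PySem.List.slice_natCast_add, Nat.mul_comm]

lemma B_eq_pvChunks (items : List Int) (p : Int) (hp : 0 < p) :
    get_page_chunks_alt items p = pvChunks p.toNat items := by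
  unfold get_page_chunks_alt
  rw [if_neg (by omega)]
  exact pvMain p hp items []

-- With a negative divisor and a nonnegative dividend, the floor quotient is ≤ 0.
lemma floordiv_nonpos_of_neg (n p : Int) (hp : p < 0) (hn : 0 ≤ n) :
    PySem.Int.floordiv n p ≤ 0 := by
  have h := PySem.Int.floordiv_mul_add_mod n p
  have hb := PySem.Int.mod_neg_bounds n hp
  set w := PySem.Int.floordiv n p with hw
  nlinarith [h, hb.1, hb.2]

-- For negative page_size, A returns [] when p ∣ n and a single tail chunk otherwise.
lemma A_neg (items : List Int) (p : Int) (hp : p < 0) :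
    get_page_chunks items p =
      if PySem.Int.mod (items.length : Int) p ≠ 0
      then [PySem.List.slice items (some (-(PySem.Int.mod (items.length : Int) p))) none]
      else [] := by
  unfold get_page_chunks
  have hw : PySem.List.pyRange 0 (PySem.Int.floordiv (items.length : Int) p) 1 = [] :=
    PySem.List.pyRange_one_eq_nil (floordiv_nonpos_of_neg _ _ hp (by positivity))
  simp only [hw, List.foldl_nil]
  split_ifs <;> simp

lemma B_neg (items : List Int) (p : Int) (hp : p ≤ 0) :
    get_page_chunks_alt items p = [] := by
  unfold get_page_chunks_alt
  rw [if_pos hp]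

-- ===== VERDICT (by name: the statement is the Claim_ definition above) =====
theorem get_page_chunks_spec : Claim_unchanged_get_page_chunks := by
  intro items p _ hpre hnD
  unfold Pre_get_page_chunks at hpre
  rcases lt_trichotomy p 0 with hneg | hz | hpos
  · have hdvd : p ∣ (items.length : Int) := by
      by_contra h
      exact hnD ⟨hneg, h⟩
    rw [A_neg items p hneg, B_neg items p hneg.le]
    rw [if_neg]
    simp [PySem.Int.mod_eq_zero_iff_dvd _ _ |>.mpr hdvd]
  · exact absurd hz hpre
  · rw [A_eq_stride items p hpos, stride_eq_pvChunks items p hpos, B_eq_pvChunks items p hpos]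

theorem get_page_chunks_changed : Claim_changed_get_page_chunks := by
  unfold Claim_changed_get_page_chunks; decide

theorem get_page_chunks_tight : Claim_exact_get_page_chunks := by
  intro items p _ _ hD
  rcases hD with ⟨hneg, hdvd⟩
  rw [A_neg items p hneg, B_neg items p hneg.le]
  rw [if_pos (by simpa [PySem.Int.mod_eq_zero_iff_dvd] using hdvd)]
  simp
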